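-- pv_equiv track=rewrite | github.com/rivermont/spidy | gui.py | make_file_path
-- ===== SOURCE A (Python) =====
-- def make_file_path(url, ext):
-- 	"""
-- 	Makes a valid Windows file path for a url.
-- 	"""
-- 	url = url.replace(ext, '')  # Remove extension from path
-- 	for char in """/\ *""":  # Remove illegal characters from path
-- 		url = url.replace(char, '-')
-- 	for char in """|:?&<>""":
-- 		url = url.replace(char, '')
-- 	url = url[:255]  # Truncate to valid file length
-- 	return url
-- ===== SOURCE B (Python) =====
-- def make_file_path(url, ext):
--     """
--     Makes a valid Windows file path for a url.
--     """
--     url = url.replace(ext, '')  # Remove extension from path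
--     # One translation table, one pass: illegal path chars -> '-' or deleted.
--     table = {ord(c): '-' for c in "/\\ *"}
--     table.update({ord(c): None for c in "|:?&<>"})
--     return url.translate(table)[:255]
-- ===== Notes on version B (the rewrite author's own statement) =====
-- stated objective: idiomatic
-- what changed: The ten repeated full-string replace scans (four char->'-' replaces, six char-deletion replaces) are replaced by one translation table applied in a single str.translate pass; the substring removal replace(ext,'') and the [:255] truncation are kept.
import Mathlib
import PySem

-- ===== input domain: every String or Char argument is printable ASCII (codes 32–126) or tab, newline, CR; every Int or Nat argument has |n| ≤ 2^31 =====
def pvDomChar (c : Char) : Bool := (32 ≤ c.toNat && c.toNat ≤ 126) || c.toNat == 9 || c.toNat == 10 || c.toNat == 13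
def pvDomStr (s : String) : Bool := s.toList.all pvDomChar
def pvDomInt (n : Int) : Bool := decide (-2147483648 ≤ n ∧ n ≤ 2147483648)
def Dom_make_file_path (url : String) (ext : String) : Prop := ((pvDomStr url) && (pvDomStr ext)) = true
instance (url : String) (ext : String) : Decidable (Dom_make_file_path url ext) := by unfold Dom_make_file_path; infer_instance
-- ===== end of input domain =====

-- B replaces A's ten repeated full-string `replace` scans by one table-driven
-- single pass (str.translate); objective: idiomatic, same return value.

-- ===== PORT A =====
def make_file_path (url : String) (ext : String) : String :=
  let u0 := PySem.Str.replace url ext ""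
  let u1 := ['/', '\\', ' ', '*'].foldl
    (fun s c => PySem.Str.replace s (String.singleton c) "-") u0
  let u2 := ['|', ':', '?', '&', '<', '>'].foldl
    (fun s c => PySem.Str.replace s (String.singleton c) "") u1
  PySem.Str.slice u2 none (some 255)

-- ===== PORT B =====
-- the translation table of Source B as a function Char → Option Char (none = delete)
def pvTable (c : Char) : Option Char :=
  if c = '/' ∨ c = '\\' ∨ c = ' ' ∨ c = '*' then some '-'
  else if c = '|' ∨ c = ':' ∨ c = '?' ∨ c = '&' ∨ c = '<' ∨ c = '>' then none
  else some c

def make_file_path_alt (url : String) (ext : String) : String :=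
  let u := PySem.Str.replace url ext ""
  PySem.Str.slice (String.ofList (u.toList.filterMap pvTable)) none (some 255)

-- ===== PRECONDITION & SPEC =====
def Spec_make_file_path (url : String) (ext : String) (out : String) : Prop := out = make_file_path_alt url ext
instance (url : String) (ext : String) (out : String) : Decidable (Spec_make_file_path url ext out) := by unfold Spec_make_file_path; infer_instance

-- ===== CLAIM (what is proved, stated in full; the proofs are below) =====
def Claim_equal_make_file_path : Prop := ∀ (url : String) (ext : String), Dom_make_file_path url ext → Spec_make_file_path url ext (make_file_path url ext)

-- ===== LEMMAS AND PROOFS =====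

-- python's s.replace(c, new) for a single char c is a flatMap over s
theorem replace_go_single (c : Char) (new : List Char) :
    ∀ (l acc : List Char) (fuel : Nat), l.length ≤ fuel →
      PySem.Chars.replace.go [c] new fuel l acc
        = acc.reverse ++ l.flatMap (fun x => if x = c then new else [x]) := by
  intro l
  induction l with
  | nil =>
      intro acc fuel _
      cases fuel <;> simp [PySem.Chars.replace.go]
  | cons x t ih =>
      intro acc fuel hf
      cases fuel with
      | zero => simp at hf
      | succ n =>
        have hlen : t.length ≤ n := by simpa using hf
        by_cases hx : x = c
        · subst hx
          have hpre : [x].isPrefixOf (x :: t) = true := by simp [List.isPrefixOf]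
          simp only [PySem.Chars.replace.go, hpre, if_pos, List.length_cons,
            List.length_nil, Nat.zero_add, List.drop_succ_cons, List.drop_zero]
          rw [ih (new.reverse ++ acc) n hlen]
          simp
        · have hpre : [c].isPrefixOf (x :: t) = false := by
            simp [List.isPrefixOf]
            intro h; exact absurd h.symm hx
          simp only [PySem.Chars.replace.go, hpre]
          rw [if_neg (by simp)]
          rw [ih (x :: acc) n hlen]
          simp [hx]

theorem replace_single (s : List Char) (c : Char) (new : List Char) :
    PySem.Chars.replace s [c] new = s.flatMap (fun x => if x = c then new else [x]) := by
  unfold PySem.Chars.replace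
  simp [replace_go_single c new s [] s.length (le_refl _)]

-- the combined per-character chain of the ten single-char replaces equals one filterMap pass
theorem chain_eq (l : List Char) :
    (((((((((((l.flatMap (fun x => if x = '/' then ['-'] else [x])).flatMap
      (fun x => if x = '\\' then ['-'] else [x])).flatMap
      (fun x => if x = ' ' then ['-'] else [x])).flatMap
      (fun x => if x = '*' then ['-'] else [x])).flatMap
      (fun x => if x = '|' then [] else [x])).flatMap
      (fun x => if x = ':' then [] else [x])).flatMap
      (fun x => if x = '?' then [] else [x])).flatMap
      (fun x => if x = '&' then [] else [x])).flatMap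
      (fun x => if x = '<' then [] else [x])).flatMap
      (fun x => if x = '>' then [] else [x])))
      = l.filterMap pvTable := by
  induction l with
  | nil => simp
  | cons x t ih =>
      simp only [List.flatMap_cons, List.flatMap_append, List.filterMap_cons]
      rw [ih]
      by_cases h1 : x = '/'
      · subst h1; simp [pvTable]
      · by_cases h2 : x = '\\'
        · subst h2; simp [pvTable]
        · by_cases h3 : x = ' '
          · subst h3; simp [pvTable]
          · by_cases h4 : x = '*'
            · subst h4; simp [pvTable]
            · by_cases h5 : x = '|'
              · subst h5; simp [pvTable]
              · by_cases h6 : x = ':'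
                · subst h6; simp [pvTable]
                · by_cases h7 : x = '?'
                  · subst h7; simp [pvTable]
                  · by_cases h8 : x = '&'
                    · subst h8; simp [pvTable]
                    · by_cases h9 : x = '<'
                      · subst h9; simp [pvTable]
                      · by_cases h10 : x = '>'
                        · subst h10; simp [pvTable]
                        · simp [pvTable, h1, h2, h3, h4, h5, h6, h7, h8, h9, h10]
-- ===== VERDICT (by name: the statement is the Claim_ definition above) =====
theorem make_file_path_spec : Claim_equal_make_file_path := by
  intro url ext _
  unfold Spec_make_file_path make_file_path make_file_path_alt
  simp only [List.foldl_cons, List.foldl_nil]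
  refine congrArg (fun s => PySem.Str.slice s none (some 255)) ?_
  apply String.toList_inj.mp
  have hsing : ∀ c : Char, (String.singleton c).toList = [c] := fun c => String.toList_singleton c
  simp only [PySem.Str.toList_replace, String.toList_ofList, hsing,
    show ("-" : String).toList = ['-'] from rfl, show ("" : String).toList = [] from rfl,
    replace_single]
  exact chain_eq _
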